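-- pv_equiv track=rewrite | github.com/mehdinemo/imdb_ner | get_prepare_data.py | mit_list2df
-- ===== SOURCE A (Python) =====
-- def mit_list2df(df_list):
--     sentense_id = 0
--     new_df_list = []
--     for line in df_list:
--         if line == '\n':
--             sentense_id += 1
--         else:
--             new_df_list.append(str(sentense_id) + '\t' + line)
--
--     return new_df_list
-- ===== SOURCE B (Python) =====
-- def mit_list2df(df_list):
--     # Group the non-blank lines into segments separated by blank lines,
--     # then flatten with enumerate so the segment index becomes the sentence id.
--     groups = []
--     cur = []
--     for line in df_list:
--         if line == '\n':
--             groups.append(cur)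
--             cur = []
--         else:
--             cur.append(line)
--     groups.append(cur)
--     return [str(i) + '\t' + line for i, g in enumerate(groups) for line in g]
-- ===== Notes on version B (the rewrite author's own statement) =====
-- stated objective: alternative
-- what changed: Instead of a running counter interleaved with output, B splits the input into groups of non-blank lines separated by blank lines and then flattens them with enumerate, the group index serving as the sentence id.
import Mathlib
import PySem

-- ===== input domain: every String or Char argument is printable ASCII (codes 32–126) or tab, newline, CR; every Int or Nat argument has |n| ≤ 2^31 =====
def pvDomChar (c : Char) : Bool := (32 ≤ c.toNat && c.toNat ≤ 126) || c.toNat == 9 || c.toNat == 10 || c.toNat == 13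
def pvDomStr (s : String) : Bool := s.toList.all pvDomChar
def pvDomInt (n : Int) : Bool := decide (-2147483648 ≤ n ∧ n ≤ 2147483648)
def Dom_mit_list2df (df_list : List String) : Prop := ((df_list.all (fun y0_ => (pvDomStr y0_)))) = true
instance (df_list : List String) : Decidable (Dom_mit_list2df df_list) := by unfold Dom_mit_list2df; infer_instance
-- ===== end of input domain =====

-- B groups non-blank lines into blank-separated segments and flattens with enumerate; same cost, different decomposition.

-- ===== PORT A =====
-- counter + output list, one fold, exactly A's loop
def mit_list2df (df_list : List String) : List String :=
  (df_list.foldl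
    (fun (st : Int × List String) line =>
      if line == "\n" then (st.1 + 1, st.2)
      else (st.1, st.2 ++ [PySem.Int.toStr st.1 ++ "\t" ++ line]))
    (0, [])).2

-- ===== PORT B =====
-- B's tag for one line of group i
def pvTag (i : Int) (line : String) : String := PySem.Int.toStr i ++ "\t" ++ line

def mit_list2df_alt (df_list : List String) : List String :=
  let st := df_list.foldl
    (fun (st : List (List String) × List String) line =>
      if line == "\n" then (st.1 ++ [st.2], ([] : List String))
      else (st.1, st.2 ++ [line]))
    ([], [])
  let groups := st.1 ++ [st.2]
  (PySem.List.enumerate groups 0).flatMap (fun p => p.2.map (pvTag p.1))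

-- ===== PRECONDITION & SPEC =====
def Spec_mit_list2df (df_list : List String) (out : List String) : Prop := out = mit_list2df_alt df_list
instance (df_list : List String) (out : List String) : Decidable (Spec_mit_list2df df_list out) := by unfold Spec_mit_list2df; infer_instance

-- ===== CLAIM (what is proved, stated in full; the proofs are below) =====
def Claim_equal_mit_list2df : Prop := ∀ (df_list : List String), Dom_mit_list2df df_list → Spec_mit_list2df df_list (mit_list2df df_list)

-- ===== LEMMAS AND PROOFS =====

-- render: what B emits for a list of groups starting at index s
def pvRender (gs : List (List String)) (s : Int) : List String :=
  (PySem.List.enumerate gs s).flatMap (fun p => p.2.map (pvTag p.1))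

lemma pvRender_append (gs : List (List String)) (g : List String) (s : Int) :
    pvRender (gs ++ [g]) s = pvRender gs s ++ g.map (pvTag (s + gs.length)) := by
  simp [pvRender, PySem.List.enumerate_append, PySem.List.enumerate]

-- loop invariant: A's fold state vs B's fold state
lemma pv_inv (l : List String) (gs : List (List String)) (cur out : List String)
    (h : out = pvRender gs 0 ++ cur.map (pvTag gs.length)) :
    (l.foldl
      (fun (st : Int × List String) line =>
        if line == "\n" then (st.1 + 1, st.2)
        else (st.1, st.2 ++ [PySem.Int.toStr st.1 ++ "\t" ++ line]))
      ((gs.length : Int), out)).2 =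
    pvRender ((l.foldl
      (fun (st : List (List String) × List String) line =>
        if line == "\n" then (st.1 ++ [st.2], ([] : List String))
        else (st.1, st.2 ++ [line]))
      (gs, cur)).1 ++ [(l.foldl
      (fun (st : List (List String) × List String) line =>
        if line == "\n" then (st.1 ++ [st.2], ([] : List String))
        else (st.1, st.2 ++ [line]))
      (gs, cur)).2]) 0 := by
  induction l generalizing gs cur out with
  | nil =>
      simp [pvRender_append, h]
  | cons x xs ih =>
      by_cases hx : x = "\n"
      · subst hx
        simp only [List.foldl_cons, BEq.rfl]
        have h' : out = pvRender (gs ++ [cur]) 0 ++ ([] : List String).map (pvTag (gs ++ [cur]).length) := by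
          simp [pvRender_append, h]
        have := ih (gs ++ [cur]) [] out h'
        simpa [List.length_append] using this
      · have hxb : (x == "\n") = false := by simp [hx]
        simp only [List.foldl_cons, hxb, if_neg, Bool.false_eq_true, not_false_iff]
        exact ih gs (cur ++ [x]) (out ++ [PySem.Int.toStr gs.length ++ "\t" ++ x])
          (by simp [h, pvTag])

-- ===== VERDICT (by name: the statement is the Claim_ definition above) =====
theorem mit_list2df_spec : Claim_equal_mit_list2df := by
  intro df_list _
  unfold Spec_mit_list2df mit_list2df mit_list2df_alt
  simpa [pvRender] using pv_inv df_list [] [] [] (by simp [pvRender, PySem.List.enumerate])
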